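-- pv_equiv track=rewrite | github.com/m-wall/advent-of-code-2024 | 02/part1.py | solve
-- ===== SOURCE A (Python) =====
-- def is_level_safe(levels):
--
--     direction = None
--
--     for x in range(1, len(levels)):
--         current = levels[x - 1]
--         next = levels[x]
--
--         if current == next:
--             return False
--         if abs(current - next) > 3:
--             return False
--         if direction is None:
--             direction = True if next > current else False
--             continue
--         current_direction = True if next > current else False
--         if current_direction != direction:
--             return False
--
--     return True
--
-- def solve(puzzle_input):
--     answer = 0
--     lines = puzzle_input.splitlines()
--
--     for line in lines:
--         levels = [int(y) for y in line.split(" ")]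
--
--         if is_level_safe(levels):
--             answer += 1
--
--     return answer
-- ===== SOURCE B (Python) =====
-- def is_safe(levels):
--     s = sorted(levels)
--     if levels != s and levels != s[::-1]:
--         return False
--     return all(1 <= b - a <= 3 for a, b in zip(s, s[1:]))
--
-- def solve(puzzle_input):
--     return sum(1 if is_safe([int(y) for y in line.split(" ")]) else 0
--                for line in puzzle_input.splitlines())
-- ===== Notes on version B (the rewrite author's own statement) =====
-- stated objective: alternative
-- what changed: Safety is decided by sorting: a line is safe iff it equals its sorted form or the reverse of its sorted form and the sorted list ascends in steps of 1..3, replacing A's single stateful scan with a direction flag and early returns; the count is a sum of 0/1 over a generator instead of a counter loop.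
import Mathlib
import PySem

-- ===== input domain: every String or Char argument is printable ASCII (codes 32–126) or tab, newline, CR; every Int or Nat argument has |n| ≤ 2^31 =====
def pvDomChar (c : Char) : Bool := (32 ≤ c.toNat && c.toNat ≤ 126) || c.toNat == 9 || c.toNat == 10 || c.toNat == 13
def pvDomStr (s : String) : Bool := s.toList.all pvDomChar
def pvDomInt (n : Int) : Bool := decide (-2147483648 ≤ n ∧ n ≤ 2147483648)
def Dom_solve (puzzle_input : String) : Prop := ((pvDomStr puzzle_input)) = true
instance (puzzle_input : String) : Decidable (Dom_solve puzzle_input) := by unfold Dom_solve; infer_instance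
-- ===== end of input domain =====

-- B decides safety by sorting: a line is safe iff it equals its sorted form or the reverse
-- of its sorted form, and the sorted list ascends in steps of 1..3; A scans once with a
-- direction flag and early returns.

-- ===== PORT A =====
-- the loop of is_level_safe: iterates over consecutive pairs (current, next), carrying the
-- Optional direction flag; `return False` becomes returning false, falling off the loop true.
def isLevelSafeGo (dir : Option Bool) (current : Int) : List Int → Bool
  | [] => true
  | next :: rest =>
    if current == next then false
    else if 3 < |current - next| then false
    else match dir with
      | none => isLevelSafeGo (some (decide (current < next))) next rest
      | some d => if decide (current < next) != d then false
                  else isLevelSafeGo (some d) next rest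

def isLevelSafe : List Int → Bool
  | [] => true
  | a :: rest => isLevelSafeGo none a rest

-- [int(y) for y in line.split(" ")]; Pre_solve guarantees every ofStr? is some
-- (split? with the nonempty separator " " never returns none).
def parseLevels (line : String) : List Int :=
  ((PySem.Str.split? line " ").getD []).map (fun y => (PySem.Int.ofStr? y).getD 0)

def solve (puzzle_input : String) : Int :=
  (PySem.Str.splitlines puzzle_input).foldl
    (fun answer line => if isLevelSafe (parseLevels line) then answer + 1 else answer) 0

-- ===== PORT B =====
-- s = sorted(levels); levels != s and levels != s[::-1] → False;
-- s[::-1] is s.reverse (PySem.List.slice?_none_none_neg_one); the zip runs over s and s[1:].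
def isSafeAlt (levels : List Int) : Bool :=
  let s := PySem.List.sorted levels (fun x => x) false
  if levels ≠ s ∧ levels ≠ s.reverse then false
  else (s.zip (s.drop 1)).all (fun p => decide (1 ≤ p.2 - p.1 ∧ p.2 - p.1 ≤ 3))

-- sum(1 if is_safe(...) else 0 for line in ...)
def solve_alt (puzzle_input : String) : Int :=
  ((PySem.Str.splitlines puzzle_input).map
    (fun line => if isSafeAlt (parseLevels line) then (1 : Int) else 0)).sum

-- ===== PRECONDITION & SPEC =====
-- Pre_: every " "-split token of every line parses as a Python int
-- (otherwise A's int(y) raises ValueError).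
def Pre_solve (puzzle_input : String) : Prop :=
  ((PySem.Str.splitlines puzzle_input).all (fun line =>
    ((PySem.Str.split? line " ").getD []).all (fun y =>
      (PySem.Int.ofStr? y).isSome))) = true
-- (an admitted input looks like "1 2": every space-separated token an int literal)
instance (puzzle_input : String) : Decidable (Pre_solve puzzle_input) := by
  unfold Pre_solve; infer_instance

def pvWitness_solve : String := "12 15 17\n90 85 83\n33 34 33"

def Spec_solve (puzzle_input : String) (out : Int) : Prop := out = solve_alt puzzle_input
instance (puzzle_input : String) (out : Int) : Decidable (Spec_solve puzzle_input out) := by unfold Spec_solve; infer_instance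

-- ===== CLAIM (what is proved, stated in full; the proofs are below) =====
def Claim_equal_solve : Prop := ∀ (puzzle_input : String), Dom_solve puzzle_input → Pre_solve puzzle_input → Spec_solve puzzle_input (solve puzzle_input)

-- ===== LEMMAS AND PROOFS =====

-- the step relation of a safe ascending line
def UpStep (u v : Int) : Prop := u < v ∧ v - u ≤ 3

-- zip-over-adjacent-pairs all-check is exactly IsChain
theorem all_zip_iff_isChain (p : Int → Int → Prop) [DecidablePred fun q : Int × Int => p q.1 q.2]
    (l : List Int) :
    ((l.zip (l.drop 1)).all (fun q => decide (p q.1 q.2)) = true) ↔ List.IsChain p l := by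
  induction l with
  | nil => simp
  | cons a t ih =>
    cases t with
    | nil => simp
    | cons b r =>
      rw [List.isChain_cons_cons, ← ih]
      simp

-- A's loop with the direction flag set: an IsChain of the directed step relation
theorem go_some_iff (rest : List Int) : ∀ (cur : Int) (d : Bool),
    isLevelSafeGo (some d) cur rest = true ↔
      List.IsChain (fun u v => if d then UpStep u v else UpStep v u) (cur :: rest) := by
  induction rest with
  | nil => intro cur d; simp [isLevelSafeGo]
  | cons n r ih =>
    intro cur d
    rw [List.isChain_cons_cons]
    simp only [isLevelSafeGo]
    by_cases h0 : cur = n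
    · simp only [h0, beq_self_eq_true, if_true]
      cases d <;> simp [UpStep]
    · simp only [beq_iff_eq, h0, if_false]
      by_cases h3 : 3 < |cur - n|
      · simp only [h3, if_true]
        rcases abs_cases (cur - n) with ⟨he, _⟩ | ⟨he, _⟩ <;>
          cases d <;> simp [UpStep] <;> (intros; omega)
      · simp only [h3, if_false]
        by_cases hd : decide (cur < n) = d
        · rw [hd, bne_self_eq_false, if_neg (by simp), ih]
          subst hd
          have hb := abs_le.mp (not_lt.mp h3)
          by_cases hlt : cur < n
          · simp only [hlt, decide_true, if_true]
            have hstep : UpStep cur n := ⟨hlt, by omega⟩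
            simp [hstep]
          · simp only [hlt, decide_false]
            have hstep : UpStep n cur := ⟨by omega, by omega⟩
            simp [hstep]
        · have hne : (decide (cur < n) != d) = true := by
            cases d <;> cases hcn : decide (cur < n) <;> simp_all
          rw [if_pos hne]
          constructor
          · intro h; cases h
          · rintro ⟨hstep, _⟩
            exfalso
            cases d <;> simp_all [UpStep] <;> omega

-- A's whole safety check: safe iff the line is a chain of up-steps or of down-steps
theorem isLevelSafe_iff (l : List Int) :
    isLevelSafe l = true ↔
      List.IsChain UpStep l ∨ List.IsChain (fun u v => UpStep v u) l := by
  cases l with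
  | nil => simp [isLevelSafe]
  | cons a rest =>
    cases rest with
    | nil => simp [isLevelSafe, isLevelSafeGo]
    | cons n r =>
      show isLevelSafeGo none a (n :: r) = true ↔ _
      simp only [isLevelSafeGo]
      by_cases h0 : a = n
      · simp only [h0, beq_self_eq_true, if_true]
        constructor
        · intro h; cases h
        · rintro (h | h) <;>
          · rw [List.isChain_cons_cons] at h
            exact absurd h.1 (by simp [UpStep])
      · simp only [beq_iff_eq, h0, if_false]
        by_cases h3 : 3 < |a - n|
        · simp only [h3, if_true]
          have hb : 3 < a - n ∨ 3 < n - a := by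
            rcases abs_cases (a - n) with ⟨he, _⟩ | ⟨he, _⟩ <;> omega
          constructor
          · intro h; cases h
          · rintro (h | h) <;> rw [List.isChain_cons_cons] at h <;>
              exact absurd h.1 (by unfold UpStep; omega)
        · simp only [h3, if_false]
          rw [go_some_iff]
          have hb := abs_le.mp (not_lt.mp h3)
          by_cases hlt : a < n
          · simp only [hlt, decide_true, if_true]
            constructor
            · intro h
              left
              rw [List.isChain_cons_cons]
              exact ⟨⟨hlt, by omega⟩, h⟩
            · rintro (h | h) <;> rw [List.isChain_cons_cons] at h
              · exact h.2
              · exact absurd h.1 (by simp [UpStep]; omega)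
          · simp only [hlt, decide_false]
            constructor
            · intro h
              right
              rw [List.isChain_cons_cons]
              refine ⟨⟨by omega, by omega⟩, h⟩
            · rintro (h | h) <;> rw [List.isChain_cons_cons] at h
              · exact absurd h.1 (by simp [UpStep]; omega)
              · exact h.2

-- a chain of up-steps is strictly sorted, so it IS its own sorted form
theorem sorted_eq_of_chain_up (l : List Int) (h : List.IsChain UpStep l) :
    PySem.List.sorted l (fun x => x) false = l := by
  have h2 : List.IsChain (· < ·) l := h.imp (fun _ _ hu => hu.1)
  have hp : List.Pairwise (fun a b : Int => a < b) l := List.isChain_iff_pairwise.mp h2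
  exact PySem.List.sorted_eq_of_perm_of_pairwise_lt l l (fun x => x) (List.Perm.refl l) hp

-- and a chain of down-steps has its reverse as sorted form
theorem sorted_eq_of_chain_down (l : List Int) (h : List.IsChain (fun u v => UpStep v u) l) :
    PySem.List.sorted l (fun x => x) false = l.reverse := by
  have hup : List.IsChain UpStep l.reverse := List.isChain_reverse.mpr h
  have h2 : List.IsChain (· < ·) l.reverse := hup.imp (fun _ _ hu => hu.1)
  have hp : List.Pairwise (fun a b : Int => a < b) l.reverse := List.isChain_iff_pairwise.mp h2
  exact PySem.List.sorted_eq_of_perm_of_pairwise_lt l l.reverse (fun x => x)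
    (List.reverse_perm l) hp

-- B's check, unfolded: the line equals its sorted form or that form's reverse,
-- and the sorted form ascends in steps of 1..3
theorem isSafeAlt_iff (l : List Int) :
    isSafeAlt l = true ↔
      ((l = PySem.List.sorted l (fun x => x) false ∨
          l = (PySem.List.sorted l (fun x => x) false).reverse) ∧
        List.IsChain UpStep (PySem.List.sorted l (fun x => x) false)) := by
  unfold isSafeAlt
  by_cases hcase : l ≠ PySem.List.sorted l (fun x => x) false ∧
      l ≠ (PySem.List.sorted l (fun x => x) false).reverse
  · rw [if_pos hcase]
    simp only [Bool.false_eq_true, false_iff]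
    rintro ⟨h | h, _⟩
    · exact hcase.1 h
    · exact hcase.2 h
  · rw [if_neg hcase,
      all_zip_iff_isChain (fun u v => 1 ≤ v - u ∧ v - u ≤ 3)]
    rw [not_and_or, not_ne_iff, not_ne_iff] at hcase
    constructor
    · intro h
      refine ⟨hcase, h.imp (fun _ _ hp => by unfold UpStep; omega)⟩
    · rintro ⟨_, h⟩
      exact h.imp (fun _ _ hp => by unfold UpStep at hp; omega)

-- the two safety checks agree on every list of levels
theorem safe_eq (l : List Int) : isLevelSafe l = isSafeAlt l := by
  rw [Bool.eq_iff_iff, isLevelSafe_iff, isSafeAlt_iff]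
  constructor
  · rintro (hc | hc)
    · have h := sorted_eq_of_chain_up l hc
      refine ⟨Or.inl h.symm, ?_⟩
      rw [h]; exact hc
    · have h := sorted_eq_of_chain_down l hc
      refine ⟨Or.inr (by rw [h, List.reverse_reverse]), ?_⟩
      rw [h]
      exact List.isChain_reverse.mpr hc
  · rintro ⟨h | h, hchain⟩
    · left; rw [← h] at hchain; exact hchain
    · right
      have hrev := List.isChain_reverse.mpr hchain
      rw [← h] at hrev
      exact hrev

-- ===== VERDICT (by name: the statement is the Claim_ definition above) =====
theorem solve_spec : Claim_equal_solve := by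
  intro s _ _
  show solve s = solve_alt s
  unfold solve solve_alt
  rw [PySem.List.sum_map_ite_one_zero, PySem.List.foldl_count_if]
  simp only [safe_eq, zero_add]
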